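-- pv_equiv track=rewrite | github.com/9-enka-9/PythonLearning | .00 EXERCISES/06Mar/BAI4.PY | check
-- ===== SOURCE A (Python) =====
-- def check(num):
--     t = num
--     s = 0
--     rev = 0
--     while t>0:
--         s+=t%10
--         rev = rev*10 + t%10
--         t//=10
--     if prime[s] and rev == num:
--         return 1
--     return 0
--
-- prime = [True for i in range(120)]
-- ===== SOURCE B (Python) =====
-- prime = [True for i in range(120)]
--
-- def check(num):
--     if num < 0:
--         return 0
--     d = str(num)
--     s = sum(int(c) for c in d)
--     if prime[s] and d == d[::-1]:
--         return 1
--     return 0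
-- ===== Notes on version B (the rewrite author's own statement) =====
-- stated objective: idiomatic
-- what changed: replaces A's arithmetic digit-extraction loop (running digit sum and numeric reversal) by string conversion: palindrome test via d == d[::-1] and digit sum over the characters of str(num)
import Mathlib
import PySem

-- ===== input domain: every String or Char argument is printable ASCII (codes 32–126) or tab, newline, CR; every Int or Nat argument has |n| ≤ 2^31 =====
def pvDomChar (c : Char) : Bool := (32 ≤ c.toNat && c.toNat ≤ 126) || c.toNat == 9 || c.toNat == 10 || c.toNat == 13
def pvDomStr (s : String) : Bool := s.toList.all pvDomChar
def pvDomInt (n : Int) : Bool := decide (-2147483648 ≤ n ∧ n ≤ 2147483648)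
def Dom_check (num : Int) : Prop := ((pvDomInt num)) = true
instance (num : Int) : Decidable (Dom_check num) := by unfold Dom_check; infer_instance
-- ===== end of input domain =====

-- B replaces A's arithmetic digit extraction / numeric reversal by string conversion:
-- palindrome via d == d[::-1] and digit sum over the characters (idiomatic, same cost).

-- ===== PORT A =====
-- module-level `prime = [True for i in range(120)]`
def primeTab : List Bool := List.replicate 120 true

-- the while loop of A: state (t, s, rev); returns the final (s, rev)
def checkLoop (t s rev : Int) : Int × Int :=
  if h : 0 < t then
    checkLoop (PySem.Int.floordiv t 10) (s + PySem.Int.mod t 10) (rev * 10 + PySem.Int.mod t 10)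
  else (s, rev)
termination_by t.toNat
decreasing_by
  rw [PySem.Int.floordiv_eq_ediv_of_pos (by norm_num : (0:Int) < 10)]
  omega

-- prime[s]: Python raises IndexError for s ≥ 120; on Dom_check, s ≤ 90, so the
-- pyGetD default is never used and the port is exact there.
def check (num : Int) : Int :=
  let p := checkLoop num 0 0
  if PySem.List.pyGetD primeTab p.1 false = true ∧ p.2 = num then 1 else 0

-- ===== PORT B =====
-- int(c) for a single char: Python raises ValueError on non-digits; on Dom_check the
-- chars of str(num) for num ≥ 0 are digits, so the getD default is never used.
def check_alt (num : Int) : Int :=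
  if num < 0 then 0
  else
    let d := PySem.Int.toChars num
    let s := (d.map (fun c => (PySem.Int.ofChars? [c]).getD 0)).sum
    if PySem.List.pyGetD primeTab s false = true ∧ d = d.reverse then 1 else 0

-- ===== PRECONDITION & SPEC =====
def Spec_check (num : Int) (out : Int) : Prop := out = check_alt num
instance (num : Int) (out : Int) : Decidable (Spec_check num out) := by unfold Spec_check; infer_instance

-- ===== CLAIM (what is proved, stated in full; the proofs are below) =====
def Claim_equal_check : Prop := ∀ (num : Int), Dom_check num → Spec_check num (check num)

-- ===== LEMMAS AND PROOFS =====

-- A's loop, run on a natural number, accumulates the base-10 digit sum and folds the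
-- digits (least-significant first) into rev.
theorem checkLoop_eq (n : Nat) : ∀ (s rev : Int),
    checkLoop (n : Int) s rev =
      (s + ((Nat.digits 10 n).sum : Int),
       (Nat.digits 10 n).foldl (fun (r : Int) (d : Nat) => r * 10 + (d : Int)) rev) := by
  induction n using Nat.strongRecOn with
  | ind n IH =>
    intro s rev
    rcases Nat.eq_zero_or_pos n with h0 | h0
    · subst h0; rw [checkLoop]; simp
    · rw [checkLoop]
      rw [dif_pos (by exact_mod_cast h0)]
      rw [show PySem.Int.floordiv (n : Int) 10 = ((n / 10 : Nat) : Int) from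
            PySem.Int.floordiv_natCast n 10,
          show PySem.Int.mod (n : Int) 10 = ((n % 10 : Nat) : Int) from
            PySem.Int.mod_natCast n 10]
      rw [IH (n / 10) (Nat.div_lt_self h0 (by norm_num))]
      rw [Nat.digits_def' (by norm_num : 1 < 10) h0]
      simp [List.foldl_cons]
      ring_nf

-- folding r ↦ r*10 + d over a digit list evaluates the reversed list as a numeral
theorem foldl_rev_eq (L : List Nat) : ∀ (r : Int),
    L.foldl (fun (r : Int) (d : Nat) => r * 10 + (d : Int)) r
      = r * 10 ^ L.length + ((Nat.ofDigits 10 L.reverse : Nat) : Int) := by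
  induction L with
  | nil => intro r; simp
  | cons d L ih =>
    intro r
    rw [List.foldl_cons, ih, List.reverse_cons, Nat.ofDigits_append]
    simp only [List.length_cons, List.length_reverse, pow_succ]
    push_cast [Nat.ofDigits_singleton]
    ring

-- Nat.toDigits via Nat.digits (positive case)
theorem toDigitsCore_eq (fuel : Nat) : ∀ (n : Nat) (ds : List Char), 0 < n → n ≤ fuel →
    Nat.toDigitsCore 10 fuel n ds = ((Nat.digits 10 n).map Nat.digitChar).reverse ++ ds := by
  induction fuel with
  | zero => intro n ds h0 hf; omega
  | succ f ih =>
    intro n ds h0 hf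
    rw [Nat.toDigitsCore]
    rw [Nat.digits_def' (by norm_num : 1 < 10) h0]
    simp only [List.map_cons, List.reverse_cons]
    by_cases h : n / 10 = 0
    · simp [h]
    · rw [if_neg h, ih (n / 10) _ (Nat.pos_of_ne_zero h)
        (by have := Nat.div_lt_self h0 (by norm_num : 1 < 10); omega)]
      simp

theorem toDigits_eq {n : Nat} (h0 : 0 < n) :
    Nat.toDigits 10 n = ((Nat.digits 10 n).map Nat.digitChar).reverse := by
  rw [Nat.toDigits, toDigitsCore_eq (n + 1) n [] h0 (by omega)]
  simp

-- digitChar is injective below 10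
theorem digitChar_inj : ∀ a < 10, ∀ b < 10, Nat.digitChar a = Nat.digitChar b → a = b := by decide

-- mapping digitChar is injective on digit lists
theorem map_digitChar_inj : ∀ (L M : List Nat), (∀ d ∈ L, d < 10) → (∀ d ∈ M, d < 10) →
    L.map Nat.digitChar = M.map Nat.digitChar → L = M := by
  intro L
  induction L with
  | nil => intro M _ _ h; cases M <;> simp_all
  | cons a L ih =>
    intro M hL hM h
    cases M with
    | nil => simp at h
    | cons b M =>
      simp only [List.map_cons, List.cons.injEq] at h
      have ha : a < 10 := hL a (by simp)
      have hb : b < 10 := hM b (by simp)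
      have hab : a = b := digitChar_inj a ha b hb h.1
      rw [hab, ih M (fun d hd => hL d (by simp [hd])) (fun d hd => hM d (by simp [hd])) h.2]

-- int(str(d)) for a single digit char
theorem ofChars_digitChar {d : Nat} (h : d < 10) :
    (PySem.Int.ofChars? [Nat.digitChar d]).getD 0 = (d : Int) := by
  interval_cases d <;> decide

-- prime[s] is True for 0 ≤ s < 120
theorem pyGetD_primeTab {s : Nat} (h : s < 120) :
    PySem.List.pyGetD primeTab ((s : Nat) : Int) false = true := by
  rw [PySem.List.pyGetD_natCast]
  unfold primeTab
  rw [List.getD_eq_getElem _ _ (by simpa using h)]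
  exact List.getElem_replicate _

-- digit sum of n ≤ 2^31 is < 120
theorem digit_sum_lt {n : Nat} (h : n ≤ 2147483648) : (Nat.digits 10 n).sum < 120 := by
  have hlen : (Nat.digits 10 n).length ≤ 10 := by
    exact (Nat.digits_length_le_iff (by norm_num) n).mpr (by omega)
  have hsum : (Nat.digits 10 n).sum ≤ (Nat.digits 10 n).length * 9 := by
    simpa using List.sum_le_card_nsmul (Nat.digits 10 n)
      9 (fun d hd => by have := Nat.digits_lt_base (by norm_num) hd; omega)
  omega

-- the numeric reversal equals n iff the digit list is a palindrome (n > 0)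
theorem rev_eq_iff_palindrome {n : Nat} (h0 : 0 < n) :
    Nat.ofDigits 10 (Nat.digits 10 n).reverse = n ↔
      (Nat.digits 10 n).reverse = Nat.digits 10 n := by
  constructor
  · intro h
    by_cases hm : n % 10 = 0
    · exfalso
      obtain ⟨T, hT⟩ : ∃ T, Nat.digits 10 n = 0 :: T := by
        refine ⟨Nat.digits 10 (n / 10), ?_⟩
        rw [Nat.digits_def' (by norm_num : 1 < 10) h0, hm]
      rw [hT, List.reverse_cons, Nat.ofDigits_append_zero] at h
      have hlt : Nat.ofDigits 10 T.reverse < 10 ^ T.length := by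
        have := Nat.ofDigits_lt_base_pow_length (b := 10) (l := T.reverse)
          (by norm_num)
          (fun x hx => Nat.digits_lt_base (by norm_num) (by rw [hT]; exact List.mem_cons_of_mem _ (List.mem_reverse.mp hx)))
        simpa using this
      have hge : 10 ^ (Nat.digits 10 n).length ≤ 10 * n :=
        Nat.base_pow_length_digits_le 10 n (by norm_num) (by omega)
      rw [hT] at hge
      simp only [List.length_cons, pow_succ'] at hge
      omega
    · have := Nat.digits_ofDigits 10 (by norm_num) (Nat.digits 10 n).reverse
        (fun l hl => Nat.digits_lt_base (by norm_num) (List.mem_reverse.mp hl))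
        (fun hne => by
          rw [List.getLast_reverse]
          have : Nat.digits 10 n = n % 10 :: Nat.digits 10 (n / 10) :=
            Nat.digits_def' (by norm_num : 1 < 10) h0
          simp [this, hm])
      rw [h] at this
      exact this.symm
  · intro h
    rw [h, Nat.ofDigits_digits]

-- main agreement on nonnegative inputs in range
set_option maxRecDepth 8192 in
theorem check_eq_alt_of_nat (n : Nat) (hn : n ≤ 2147483648) :
    check ((n : Nat) : Int) = check_alt ((n : Nat) : Int) := by
  rcases Nat.eq_zero_or_pos n with h0 | h0
  · subst h0
    unfold check check_alt
    rw [checkLoop, dif_neg (by norm_num)]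
    decide
  · have hL10 : ∀ d ∈ Nat.digits 10 n, d < 10 :=
      fun d hd => Nat.digits_lt_base (by norm_num) hd
    -- A side
    unfold check
    dsimp only
    rw [checkLoop_eq n 0 0, foldl_rev_eq]
    simp only [zero_add, zero_mul]
    rw [pyGetD_primeTab (digit_sum_lt hn)]
    simp only [true_and]
    -- B side
    unfold check_alt
    rw [if_neg (show ¬(((n : Nat) : Int) < 0) by exact_mod_cast Nat.not_lt.mpr (Nat.zero_le n))]
    dsimp only
    have htc : PySem.Int.toChars ((n : Nat) : Int) = ((Nat.digits 10 n).map Nat.digitChar).reverse := by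
      rw [PySem.Int.toChars]
      rw [if_neg (by exact_mod_cast Nat.not_lt.mpr (Nat.zero_le n))]
      simp [toDigits_eq h0]
    rw [htc]
    have hsum : ((((Nat.digits 10 n).map Nat.digitChar).reverse).map
        (fun c => (PySem.Int.ofChars? [c]).getD 0)).sum = (((Nat.digits 10 n).sum : Nat) : Int) := by
      rw [List.map_reverse, List.sum_reverse, List.map_map]
      have : ((Nat.digits 10 n).map ((fun c => (PySem.Int.ofChars? [c]).getD 0) ∘ Nat.digitChar))
          = (Nat.digits 10 n).map (fun (d : Nat) => (d : Int)) := by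
        apply List.map_congr_left
        intro d hd
        exact ofChars_digitChar (hL10 d hd)
      rw [this]
      simp [Nat.cast_list_sum]
    rw [hsum, pyGetD_primeTab (digit_sum_lt hn)]
    simp only [true_and]
    -- the two conditions coincide
    have hrev : ((Nat.ofDigits 10 (Nat.digits 10 n).reverse : Nat) : Int) = ((n : Nat) : Int) ↔
        (Nat.digits 10 n).reverse = Nat.digits 10 n := by
      rw [Int.natCast_inj]
      exact rev_eq_iff_palindrome h0
    have hpal : (((Nat.digits 10 n).map Nat.digitChar).reverse
          = (((Nat.digits 10 n).map Nat.digitChar).reverse).reverse) ↔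
        (Nat.digits 10 n).reverse = Nat.digits 10 n := by
      rw [List.reverse_reverse, ← List.map_reverse]
      constructor
      · intro h
        exact map_digitChar_inj _ _ (fun d hd => hL10 d (List.mem_reverse.mp hd)) hL10 h
      · intro h; rw [h]
    by_cases hc : (Nat.digits 10 n).reverse = Nat.digits 10 n
    · rw [if_pos (hrev.mpr hc), if_pos (hpal.mpr hc)]
    · rw [if_neg (fun h => hc (hrev.mp h)), if_neg (fun h => hc (hpal.mp h))]

-- ===== VERDICT (by name: the statement is the Claim_ definition above) =====
theorem check_spec : Claim_equal_check := by
  intro num hdom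
  unfold Spec_check
  by_cases hneg : num < 0
  · -- loop does not run; rev = 0 ≠ num < 0, so A returns 0, as does B
    unfold check check_alt
    rw [checkLoop]
    rw [dif_neg (by omega)]
    rw [if_pos hneg]
    simp only
    rw [if_neg (by rintro ⟨-, h⟩; omega)]
  · have hn : num = ((num.toNat : Nat) : Int) := by omega
    have hle : num.toNat ≤ 2147483648 := by
      unfold Dom_check pvDomInt at hdom
      simp only [decide_eq_true_eq] at hdom
      omega
    rw [hn]
    exact check_eq_alt_of_nat num.toNat hle
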